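-- pv_equiv track=rewrite | github.com/AllanFC/AdventOfCode2023 | Day04/Day04.py | partOne
-- ===== SOURCE A (Python) =====
-- def partOne(winningNumbers, myNumbers):
--     total = 0
--
--     for n in myNumbers:
--         if n in winningNumbers:
--             if total == 0:
--                 total = 1
--             else:
--                 total *= 2
--     return total
-- ===== SOURCE B (Python) =====
-- def partOne(winningNumbers, myNumbers):
--     count = sum(1 for n in myNumbers if n in winningNumbers)
--     return 2 ** (count - 1) if count else 0
-- ===== Notes on version B (the rewrite author's own statement) =====
-- stated objective: simpler
-- what changed: Replaces the stateful doubling loop with a single match count followed by the closed-form score 2**(count-1) (0 when no match).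
import Mathlib
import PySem

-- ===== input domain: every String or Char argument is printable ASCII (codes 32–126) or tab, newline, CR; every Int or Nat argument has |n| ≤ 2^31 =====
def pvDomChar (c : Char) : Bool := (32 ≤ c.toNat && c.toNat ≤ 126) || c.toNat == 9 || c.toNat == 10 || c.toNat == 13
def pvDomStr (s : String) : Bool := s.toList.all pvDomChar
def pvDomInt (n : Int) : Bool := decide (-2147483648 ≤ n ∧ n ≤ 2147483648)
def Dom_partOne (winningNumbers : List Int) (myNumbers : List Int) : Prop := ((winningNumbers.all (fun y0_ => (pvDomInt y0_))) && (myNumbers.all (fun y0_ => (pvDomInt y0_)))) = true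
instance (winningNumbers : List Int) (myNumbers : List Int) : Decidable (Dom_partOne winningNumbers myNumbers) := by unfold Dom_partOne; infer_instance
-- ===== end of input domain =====

-- ===== PORT A =====
-- A: running total doubled (or set to 1) on each match, left to right.
def partOneLoop (winningNumbers : List Int) (total : Int) : List Int → Int
  | [] => total
  | n :: rest =>
    if winningNumbers.contains n then
      partOneLoop winningNumbers (if total = 0 then 1 else total * 2) rest
    else
      partOneLoop winningNumbers total rest

def partOne (winningNumbers : List Int) (myNumbers : List Int) : Int :=
  partOneLoop winningNumbers 0 myNumbers

-- ===== PORT B =====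
-- B: count the matches, then the closed-form score 2^(count-1) (0 if no match).
def partOne_alt (winningNumbers : List Int) (myNumbers : List Int) : Int :=
  let count := myNumbers.countP (fun n => winningNumbers.contains n)
  if count = 0 then 0 else (2 : Int) ^ (count - 1)

-- ===== PRECONDITION & SPEC =====
def Spec_partOne (winningNumbers : List Int) (myNumbers : List Int) (out : Int) : Prop := out = partOne_alt winningNumbers myNumbers
instance (winningNumbers : List Int) (myNumbers : List Int) (out : Int) : Decidable (Spec_partOne winningNumbers myNumbers out) := by unfold Spec_partOne; infer_instance

-- ===== CLAIM (what is proved, stated in full; the proofs are below) =====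
def Claim_equal_partOne : Prop := ∀ (winningNumbers : List Int) (myNumbers : List Int), Dom_partOne winningNumbers myNumbers → Spec_partOne winningNumbers myNumbers (partOne winningNumbers myNumbers)

-- ===== LEMMAS AND PROOFS =====

-- ===== VERDICT (by name: the statement is the Claim_ definition above) =====
-- score c = value of the running total after c matches have been processed
def pvScore (c : Nat) : Int := if c = 0 then 0 else (2 : Int) ^ (c - 1)

theorem pvLoop_score (w : List Int) (ms : List Int) (c : Nat) :
    partOneLoop w (pvScore c) ms = pvScore (c + ms.countP (fun n => w.contains n)) := by
  induction ms generalizing c with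
  | nil => simp [partOneLoop]
  | cons n rest ih =>
    by_cases h : w.contains n
    · have hstep : (if pvScore c = 0 then 1 else pvScore c * 2) = pvScore (c + 1) := by
        cases c with
        | zero => simp [pvScore]
        | succ k =>
          have hne : (2 : Int) ^ k ≠ 0 := pow_ne_zero _ (by norm_num)
          simp [pvScore, hne, pow_succ, mul_comm]
      simp only [partOneLoop, h, if_true, hstep, ih (c + 1), List.countP_cons]
      congr 1
      omega
    · simp only [partOneLoop, h, ih c, List.countP_cons]
      simp [h]

theorem partOne_spec : Claim_equal_partOne := by
  intro w ms _
  unfold Spec_partOne partOne partOne_alt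
  have h := pvLoop_score w ms 0
  simpa [pvScore] using h
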